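-- pv_equiv track=rewrite | github.com/anaro25/cmsc-190 | transitions_overlayer.py | overlay_cyclic_transitions
-- ===== SOURCE A (Python) =====
-- def overlay_cyclic_transitions(composite_grid):
-- 	n = len(composite_grid)
-- 	cyclic_composite_grid = [row[:] for row in composite_grid]
--
-- 	for r in range(n):
-- 		for c in range(n):
--
-- 			# rows with right arrows
-- 			if r % 4 == 0:
-- 				if r == 0:
-- 					# top row
-- 					if c % 4 == 1:
-- 						cyclic_composite_grid[r][c] = '→'
-- 				elif r == n - 1:
-- 					# bottom row
-- 					if c % 4 == 3:
-- 						cyclic_composite_grid[r][c] = '→'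
-- 				else:
-- 					# middle rows
-- 					if c % 2 == 1:
-- 						cyclic_composite_grid[r][c] = '→'
--
-- 			# rows with left arrows
-- 			elif r % 4 == 2:
-- 				if r == n - 1:
-- 					# bottom row when bottom row is a left-arrow row
-- 					if c % 4 == 1:
-- 						cyclic_composite_grid[r][c] = '←'
-- 				else:
-- 					if c % 2 == 1:
-- 						cyclic_composite_grid[r][c] = '←'
--
-- 			# rows like: ↑ · ↓ · ↑ · ↓ ...
-- 			elif r % 4 == 1:
-- 				if c % 4 == 0 and c != n - 1:
-- 					cyclic_composite_grid[r][c] = '↑'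
-- 				elif c % 4 == 2:
-- 					cyclic_composite_grid[r][c] = '↓'
--
-- 			# rows like: · · ↓ · ↑ · ↓ · ↑
-- 			elif r % 4 == 3:
-- 				if c % 4 == 2 and c != n - 1:
-- 					cyclic_composite_grid[r][c] = '↓'
-- 				elif c % 4 == 0 and c != 0:
-- 					cyclic_composite_grid[r][c] = '↑'
--
-- 	return cyclic_composite_grid
-- ===== SOURCE B (Python) =====
-- def overlay_cyclic_transitions(composite_grid):
-- 	n = len(composite_grid)
-- 	out = [row[:] for row in composite_grid]
-- 	for r in range(n):
-- 		row = out[r]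
-- 		m = r % 4
-- 		if m == 0:
-- 			if r == 0:
-- 				for c in range(1, n, 4):
-- 					row[c] = '→'
-- 			elif r == n - 1:
-- 				for c in range(3, n, 4):
-- 					row[c] = '→'
-- 			else:
-- 				for c in range(1, n, 2):
-- 					row[c] = '→'
-- 		elif m == 2:
-- 			if r == n - 1:
-- 				for c in range(1, n, 4):
-- 					row[c] = '←'
-- 			else:
-- 				for c in range(1, n, 2):
-- 					row[c] = '←'
-- 		elif m == 1:
-- 			for c in range(0, n, 4):
-- 				if c != n - 1:
-- 					row[c] = '↑'
-- 			for c in range(2, n, 4):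
-- 				row[c] = '↓'
-- 		else:
-- 			for c in range(2, n, 4):
-- 				if c != n - 1:
-- 					row[c] = '↓'
-- 			for c in range(4, n, 4):
-- 				row[c] = '↑'
-- 	return out
-- ===== Notes on version B (the rewrite author's own statement) =====
-- stated objective: alternative
-- what changed: Instead of A's full n×n double scan testing every cell's residues, B makes one pass over the rows, dispatches once per row on its class (r % 4 plus top/bottom special cases) and writes arrows only at the relevant columns with strided range() loops.
import Mathlib
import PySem

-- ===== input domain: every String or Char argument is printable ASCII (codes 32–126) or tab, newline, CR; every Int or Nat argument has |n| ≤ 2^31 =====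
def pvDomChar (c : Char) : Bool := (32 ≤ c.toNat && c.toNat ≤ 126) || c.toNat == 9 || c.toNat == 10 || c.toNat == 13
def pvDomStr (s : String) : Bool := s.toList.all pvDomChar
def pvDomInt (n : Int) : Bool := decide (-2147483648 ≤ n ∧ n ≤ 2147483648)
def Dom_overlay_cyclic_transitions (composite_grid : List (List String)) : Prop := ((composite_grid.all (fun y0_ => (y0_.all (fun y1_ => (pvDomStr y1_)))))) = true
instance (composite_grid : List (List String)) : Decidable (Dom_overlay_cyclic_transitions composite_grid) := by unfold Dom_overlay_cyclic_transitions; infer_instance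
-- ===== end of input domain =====

-- B rewrites the full n×n double scan as one pass over rows that dispatches on the row class
-- and writes arrows only at the relevant columns via strided ranges (alternative decomposition).
-- Pre_ excludes grids where a row is too short to hold an arrow cell: Python A raises IndexError there (B raises too).


-- ===== PORT A =====
-- cyclic_composite_grid[r][c] = v  (in-range assignment; Pre_ guarantees every executed assignment is in range)
def pySet2 (g : List (List String)) (r c : Nat) (v : String) : List (List String) :=
  g.modify r (fun row => row.set c v)

-- literal transliteration of A: copy, then the nested for-loops over range(n) with the if/elif chain
def overlay_cyclic_transitions (composite_grid : List (List String)) : List (List String) :=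
  let n := composite_grid.length
  (List.range n).foldl (fun g r =>
    (List.range n).foldl (fun g c =>
      if r % 4 = 0 then
        if r = 0 then
          (if c % 4 = 1 then pySet2 g r c "→" else g)
        else if r = n - 1 then
          (if c % 4 = 3 then pySet2 g r c "→" else g)
        else
          (if c % 2 = 1 then pySet2 g r c "→" else g)
      else if r % 4 = 2 then
        if r = n - 1 then
          (if c % 4 = 1 then pySet2 g r c "←" else g)
        else
          (if c % 2 = 1 then pySet2 g r c "←" else g)
      else if r % 4 = 1 then
        (if c % 4 = 0 ∧ c ≠ n - 1 then pySet2 g r c "↑"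
         else if c % 4 = 2 then pySet2 g r c "↓" else g)
      else
        (if c % 4 = 2 ∧ c ≠ n - 1 then pySet2 g r c "↓"
         else if c % 4 = 0 ∧ c ≠ 0 then pySet2 g r c "↑" else g))
      g)
    composite_grid

-- ===== PORT B =====
-- port of range(a, n, s): exact for Nat arguments with s > 0 (the only way B calls it)
def pyRangeNat (a n s : Nat) : List Nat :=
  (List.range n).filter (fun c => a ≤ c && (c - a) % s == 0)

-- for c in cs: row[c] = v
def setCols (row : List String) (cs : List Nat) (v : String) : List String :=
  cs.foldl (fun row c => row.set c v) row

-- for c in cs: if c != e: row[c] = v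
def setColsExcept (row : List String) (cs : List Nat) (e : Nat) (v : String) : List String :=
  cs.foldl (fun row c => if c ≠ e then row.set c v else row) row

-- B's per-row dispatch on r % 4 and the top/bottom special cases
def bRow (n r : Nat) (row : List String) : List String :=
  if r % 4 = 0 then
    if r = 0 then setCols row (pyRangeNat 1 n 4) "→"
    else if r = n - 1 then setCols row (pyRangeNat 3 n 4) "→"
    else setCols row (pyRangeNat 1 n 2) "→"
  else if r % 4 = 2 then
    if r = n - 1 then setCols row (pyRangeNat 1 n 4) "←"
    else setCols row (pyRangeNat 1 n 2) "←"
  else if r % 4 = 1 then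
    setCols (setColsExcept row (pyRangeNat 0 n 4) (n - 1) "↑") (pyRangeNat 2 n 4) "↓"
  else
    setCols (setColsExcept row (pyRangeNat 2 n 4) (n - 1) "↓") (pyRangeNat 4 n 4) "↑"

-- B: copy, then one pass over the rows (r runs over 0..n-1 = every row, so the loop is a mapIdx)
def overlay_cyclic_transitions_alt (composite_grid : List (List String)) : List (List String) :=
  let n := composite_grid.length
  composite_grid.mapIdx (fun r row => bRow n r row)

-- ===== PRECONDITION & SPEC =====
-- the arrow (if any) A's if/elif chain assigns at cell (r, c) of an n×n scan — a closed-form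
-- per-cell condition on residues and boundaries, used only to state where A would write
def arrowAt (n r c : Nat) : Option String :=
  if r % 4 = 0 then
    if r = 0 then (if c % 4 = 1 then some "→" else none)
    else if r = n - 1 then (if c % 4 = 3 then some "→" else none)
    else (if c % 2 = 1 then some "→" else none)
  else if r % 4 = 2 then
    if r = n - 1 then (if c % 4 = 1 then some "←" else none)
    else (if c % 2 = 1 then some "←" else none)
  else if r % 4 = 1 then
    (if c % 4 = 0 ∧ c ≠ n - 1 then some "↑" else if c % 4 = 2 then some "↓" else none)
  else
    (if c % 4 = 2 ∧ c ≠ n - 1 then some "↓" else if c % 4 = 0 ∧ c ≠ 0 then some "↑" else none)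

-- Pre_ excludes exactly the grids on which Python A raises IndexError: a row r shorter than n
-- with an arrow cell (r, c) at some column c beyond the row's length (B raises there too)
def Pre_overlay_cyclic_transitions (composite_grid : List (List String)) : Prop :=
  ∀ r ∈ List.range composite_grid.length, ∀ c ∈ List.range composite_grid.length,
    (composite_grid.getD r []).length ≤ c → arrowAt composite_grid.length r c = none

instance (composite_grid : List (List String)) : Decidable (Pre_overlay_cyclic_transitions composite_grid) := by
  unfold Pre_overlay_cyclic_transitions; infer_instance

def pvWitness_overlay_cyclic_transitions : List (List String) :=
  [["a", "b", "c"], ["d", "e", "f"], ["g", "h", "i"]]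

def Spec_overlay_cyclic_transitions (composite_grid : List (List String)) (out : List (List String)) : Prop := out = overlay_cyclic_transitions_alt composite_grid
instance (composite_grid : List (List String)) (out : List (List String)) : Decidable (Spec_overlay_cyclic_transitions composite_grid out) := by unfold Spec_overlay_cyclic_transitions; infer_instance

-- ===== CLAIM (what is proved, stated in full; the proofs are below) =====
def Claim_equal_overlay_cyclic_transitions : Prop := ∀ (composite_grid : List (List String)), Dom_overlay_cyclic_transitions composite_grid → Pre_overlay_cyclic_transitions composite_grid → Spec_overlay_cyclic_transitions composite_grid (overlay_cyclic_transitions composite_grid)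

-- ===== LEMMAS AND PROOFS =====

-- both programs' result, cell by cell: the arrow at (r, c) if the n×n scan writes one, else the old cell
def cellSpec (n r : Nat) (row : List String) : List String :=
  row.mapIdx (fun c x => if c < n then (arrowAt n r c).getD x else x)

theorem modify_comp {α : Type} (l : List α) (i : Nat) (f g : α → α) :
    (l.modify i f).modify i g = l.modify i (fun x => g (f x)) := by
  apply List.ext_getElem?
  intro j
  simp only [List.getElem?_modify]
  cases l[j]? <;> simp <;> split_ifs <;> rfl

theorem set_eq_modify {α : Type} (l : List α) (i : Nat) (a : α) :
    l.set i a = l.modify i (fun _ => a) := by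
  apply List.ext_getElem?
  intro j
  rw [List.getElem?_set, List.getElem?_modify]
  rcases h : l[j]? with _ | x
  · have hlen := List.getElem?_eq_none_iff.1 h
    split_ifs <;> first | rfl | omega
  · have hlt := (List.getElem?_eq_some_iff.1 h).1
    show _ = some (if i = j then a else x)
    split_ifs <;> first | rfl | omega

theorem foldl_modify_fixed {α β : Type} (cs : List β) (r : Nat) (f : β → α → α) (g : List α) :
    cs.foldl (fun g c => g.modify r (f c)) g
      = g.modify r (fun x => cs.foldl (fun x c => f c x) x) := by
  induction cs generalizing g with
  | nil => exact (List.modify_id r g).symm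
  | cons c cs ih =>
    simp only [List.foldl_cons, ih, modify_comp]

theorem foldl_range_modify {α : Type} (n : Nat) (u : Nat → α → α) (l : List α) :
    (List.range n).foldl (fun l i => l.modify i (u i)) l
      = l.mapIdx (fun i x => if i < n then u i x else x) := by
  induction n with
  | zero =>
    apply List.ext_getElem?
    intro j
    simp [List.getElem?_mapIdx]
  | succ n ih =>
    rw [List.range_succ, List.foldl_append, List.foldl_cons, List.foldl_nil, ih]
    apply List.ext_getElem?
    intro j
    simp only [List.getElem?_modify, List.getElem?_mapIdx]
    rcases h : l[j]? with _ | x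
    · simp
    · simp only [Option.map_some]
      by_cases hj : n = j
      · subst hj; simp
      · simp [hj]
        split_ifs <;> first | rfl | omega

theorem mem_pyRangeNat (a n s i : Nat) :
    i ∈ pyRangeNat a n s ↔ i < n ∧ a ≤ i ∧ (i - a) % s = 0 := by
  simp [pyRangeNat, List.mem_filter, List.mem_range]

theorem set_if_getElem? (p : Nat → Bool) (v : String) (l : List String) (c i : Nat) :
    (if p c then l.set c v else l)[i]?
      = if c = i ∧ p c then Option.map (fun _ => v) l[i]? else l[i]? := by
  by_cases hpc : p c
  · simp only [hpc, if_true, and_true, List.getElem?_set]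
    by_cases hci : c = i
    · subst hci
      rcases h : l[c]? with _ | x
      · have hlen := List.getElem?_eq_none_iff.1 h
        split_ifs <;> first | rfl | omega
      · have hlt := (List.getElem?_eq_some_iff.1 h).1
        split_ifs <;> first | rfl | omega
    · simp [hci]
  · simp [hpc]

theorem getElem?_foldl_setIf (p : Nat → Bool) (v : String) (cs : List Nat) (row : List String) (i : Nat) :
    (cs.foldl (fun row c => if p c then row.set c v else row) row)[i]?
      = if i ∈ cs ∧ p i then Option.map (fun _ => v) row[i]? else row[i]? := by
  induction cs generalizing row with
  | nil => simp
  | cons c cs ih =>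
    rw [List.foldl_cons, ih, set_if_getElem?]
    simp only [List.mem_cons]
    by_cases hpi : p i <;> by_cases hic : i ∈ cs <;> by_cases hci : c = i <;>
      simp_all <;>
        first
          | (cases row[i]? <;> rfl)
          | (intro h; exact absurd h.symm hci)

theorem mapIdx_congr' {α β : Type} (f g : Nat → α → β) (l : List α)
    (h : ∀ i x, f i x = g i x) : l.mapIdx f = l.mapIdx g := by
  have : f = g := funext fun i => funext (h i)
  rw [this]

theorem mapIdx_mapIdx' {α : Type} (f g : Nat → α → α) (l : List α) :
    (l.mapIdx f).mapIdx g = l.mapIdx (fun i x => g i (f i x)) := by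
  apply List.ext_getElem?
  intro j
  simp only [List.getElem?_mapIdx]
  cases l[j]? <;> rfl

theorem setCols_eq_mapIdx (cs : List Nat) (row : List String) (v : String) :
    setCols row cs v = row.mapIdx (fun c x => if c ∈ cs then v else x) := by
  apply List.ext_getElem?
  intro i
  have h : setCols row cs v
      = cs.foldl (fun row c => if (fun _ => true) c then row.set c v else row) row := by
    simp [setCols]
  rw [h, getElem?_foldl_setIf, List.getElem?_mapIdx]
  rcases hx : row[i]? with _ | x <;> simp <;> split_ifs <;> rfl

theorem setColsExcept_eq_mapIdx (cs : List Nat) (row : List String) (e : Nat) (v : String) :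
    setColsExcept row cs e v = row.mapIdx (fun c x => if c ∈ cs ∧ c ≠ e then v else x) := by
  apply List.ext_getElem?
  intro i
  have h : setColsExcept row cs e v
      = cs.foldl (fun row c => if (fun c => decide (c ≠ e)) c then row.set c v else row) row := by
    simp [setColsExcept]
  rw [h, getElem?_foldl_setIf, List.getElem?_mapIdx]
  rcases hx : row[i]? with _ | x <;> simp <;> split_ifs <;> simp_all

theorem bRow_eq (n r : Nat) (row : List String) : bRow n r row = cellSpec n r row := by
  unfold bRow cellSpec arrowAt
  split_ifs with h1 h2 h3 h4 h5 <;>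
    rw [setCols_eq_mapIdx] <;>
    first
      | (apply mapIdx_congr'
         intro c x
         simp only [mem_pyRangeNat]
         split_ifs <;> first | rfl | omega)
      | (rw [setColsExcept_eq_mapIdx, mapIdx_mapIdx']
         apply mapIdx_congr'
         intro c x
         simp only [mem_pyRangeNat]
         split_ifs <;> first | rfl | omega)

theorem bodyA_eq (n r c : Nat) (g : List (List String)) :
    (if r % 4 = 0 then
        if r = 0 then
          (if c % 4 = 1 then pySet2 g r c "→" else g)
        else if r = n - 1 then
          (if c % 4 = 3 then pySet2 g r c "→" else g)
        else
          (if c % 2 = 1 then pySet2 g r c "→" else g)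
      else if r % 4 = 2 then
        if r = n - 1 then
          (if c % 4 = 1 then pySet2 g r c "←" else g)
        else
          (if c % 2 = 1 then pySet2 g r c "←" else g)
      else if r % 4 = 1 then
        (if c % 4 = 0 ∧ c ≠ n - 1 then pySet2 g r c "↑"
         else if c % 4 = 2 then pySet2 g r c "↓" else g)
      else
        (if c % 4 = 2 ∧ c ≠ n - 1 then pySet2 g r c "↓"
         else if c % 4 = 0 ∧ c ≠ 0 then pySet2 g r c "↑" else g))
      = g.modify r (fun row => row.modify c (fun x => (arrowAt n r c).getD x)) := by
  have hid : g = g.modify r (fun row => row.modify c (fun x : String => x)) := by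
    have h2 : (fun row : List String => row.modify c (fun x : String => x)) = id := by
      funext row; exact List.modify_id c row
    rw [h2, List.modify_id]
  unfold arrowAt
  split_ifs <;> simp [pySet2, set_eq_modify] <;> exact hid

theorem overlay_A_char (g : List (List String)) :
    overlay_cyclic_transitions g
      = g.mapIdx (fun r row => if r < g.length then cellSpec g.length r row else row) := by
  have h1 : overlay_cyclic_transitions g
      = (List.range g.length).foldl (fun g' r => g'.modify r (fun row =>
          (List.range g.length).foldl (fun row c =>
            row.modify c (fun x => (arrowAt g.length r c).getD x)) row)) g := by
    simp only [overlay_cyclic_transitions, bodyA_eq, foldl_modify_fixed]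
  rw [h1, foldl_range_modify]
  apply mapIdx_congr'
  intro r row
  rw [foldl_range_modify]
  rfl

-- ===== VERDICT (by name: the statement is the Claim_ definition above) =====
theorem overlay_cyclic_transitions_spec : Claim_equal_overlay_cyclic_transitions := by
  intro g _ _
  unfold Spec_overlay_cyclic_transitions
  rw [overlay_A_char]
  unfold overlay_cyclic_transitions_alt
  apply List.ext_getElem?
  intro j
  simp only [List.getElem?_mapIdx]
  rcases h : g[j]? with _ | row
  · simp
  · have hlt : j < g.length := (List.getElem?_eq_some_iff.1 h).1
    simp [hlt, bRow_eq]
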